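-- pv_equiv track=rewrite | github.com/utisz86/ThinkLike | 7 Fejezet/fejezet74.py | nulla_es_ot_szamjegy_szam
-- ===== SOURCE A (Python) =====
-- def nulla_es_ot_szamjegy_szam(n):
--     szamlalo = 0
--     while n > 0:
--         szamjegy = n % 10
--         if szamjegy == 0 or szamjegy == 5:
--             szamlalo += 1
--         n = n // 10
--     return szamlalo
-- ===== SOURCE B (Python) =====
-- def nulla_es_ot_szamjegy_szam(n):
--     if n <= 0:
--         return 0
--     return sum(1 for c in str(n) if c in '05')
-- ===== Notes on version B (the rewrite author's own statement) =====
-- stated objective: idiomatic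
-- what changed: B counts the '0'/'5' characters of the decimal string str(n) (guarded by n > 0) instead of A's while-loop extracting digits with modulo and integer division.
import Mathlib
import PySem

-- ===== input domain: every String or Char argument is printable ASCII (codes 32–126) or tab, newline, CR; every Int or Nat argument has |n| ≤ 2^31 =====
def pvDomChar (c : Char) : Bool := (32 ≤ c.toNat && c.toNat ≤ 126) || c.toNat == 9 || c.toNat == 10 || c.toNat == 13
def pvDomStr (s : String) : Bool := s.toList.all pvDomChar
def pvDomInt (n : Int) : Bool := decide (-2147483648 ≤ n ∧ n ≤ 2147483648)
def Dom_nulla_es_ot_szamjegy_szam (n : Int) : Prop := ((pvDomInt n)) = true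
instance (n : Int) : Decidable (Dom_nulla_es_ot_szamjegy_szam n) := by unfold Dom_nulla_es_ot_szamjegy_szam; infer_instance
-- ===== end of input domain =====

-- B counts the '0'/'5' characters of str(n) (guarded by n > 0) instead of A's %10-//10 digit loop.

-- ===== PORT A =====
-- A's while loop: state is (n, szamlalo); terminates because n.toNat strictly decreases.
def pvLoopA (n szamlalo : Int) : Int :=
  if h : 0 < n then
    let szamjegy := PySem.Int.mod n 10
    let szamlalo' := if szamjegy == 0 || szamjegy == 5 then szamlalo + 1 else szamlalo
    pvLoopA (PySem.Int.floordiv n 10) szamlalo'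
  else szamlalo
termination_by n.toNat
decreasing_by
  have h10 : PySem.Int.floordiv n 10 = (n.toNat / 10 : Nat) := by
    simp [PySem.Int.floordiv, Int.fdiv_eq_ediv_of_nonneg n (by norm_num : (0:Int) ≤ 10)]
    omega
  rw [h10]
  simp only [Int.toNat_natCast]
  omega

def nulla_es_ot_szamjegy_szam (n : Int) : Int := pvLoopA n 0

-- ===== PORT B =====
def nulla_es_ot_szamjegy_szam_alt (n : Int) : Int :=
  if n ≤ 0 then 0
  else ((PySem.Int.toStr n).toList.countP (fun c => c == '0' || c == '5') : Int)

-- ===== PRECONDITION & SPEC =====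
def Spec_nulla_es_ot_szamjegy_szam (n : Int) (out : Int) : Prop := out = nulla_es_ot_szamjegy_szam_alt n
instance (n : Int) (out : Int) : Decidable (Spec_nulla_es_ot_szamjegy_szam n out) := by unfold Spec_nulla_es_ot_szamjegy_szam; infer_instance

-- ===== CLAIM (what is proved, stated in full; the proofs are below) =====
def Claim_equal_nulla_es_ot_szamjegy_szam : Prop := ∀ (n : Int), Dom_nulla_es_ot_szamjegy_szam n → Spec_nulla_es_ot_szamjegy_szam n (nulla_es_ot_szamjegy_szam n)

-- ===== LEMMAS AND PROOFS =====

-- number of digits of m equal to 0 or 5 (counting at least the last digit)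
def pvCnt (m : Nat) : Nat :=
  (if m % 10 = 0 ∨ m % 10 = 5 then 1 else 0) +
    (if h : m / 10 = 0 then 0 else pvCnt (m / 10))
termination_by m
decreasing_by omega

lemma pvLoopA_eq (k : Nat) (n s : Int) (hk : n.toNat ≤ k) :
    pvLoopA n s = s + (if 0 < n then (pvCnt n.toNat : Int) else 0) := by
  induction k generalizing n s with
  | zero =>
    rw [pvLoopA]
    have : ¬ 0 < n := by omega
    simp [this]
  | succ k ih =>
    rw [pvLoopA]
    by_cases h : 0 < n
    · simp only [h, dif_pos, if_pos]
      have hmod : PySem.Int.mod n 10 = ((n.toNat % 10 : Nat) : Int) := by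
        have := Int.fmod_eq_emod (a := n) (b := 10)
        simp only [PySem.Int.mod]
        omega
      have hdiv : PySem.Int.floordiv n 10 = ((n.toNat / 10 : Nat) : Int) := by
        simp only [PySem.Int.floordiv, Int.fdiv_eq_ediv_of_nonneg n (by norm_num : (0:Int) ≤ 10)]
        omega
      rw [hmod, hdiv, ih _ _ (by omega)]
      simp only [Int.toNat_natCast]
      conv_rhs => rw [pvCnt]
      have hbeq : ((((n.toNat % 10 : Nat) : Int) == 0 || ((n.toNat % 10 : Nat) : Int) == 5) = true)
          ↔ (n.toNat % 10 = 0 ∨ n.toNat % 10 = 5) := by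
        simp only [beq_iff_eq, Bool.or_eq_true]
        omega
      by_cases hz : n.toNat / 10 = 0
      · have hlt : ¬ (0:Int) < ((n.toNat / 10 : Nat) : Int) := by omega
        rw [dif_pos hz, if_neg hlt]
        by_cases h05 : n.toNat % 10 = 0 ∨ n.toNat % 10 = 5
        · rw [if_pos (hbeq.mpr h05), if_pos h05]; omega
        · rw [if_neg (hbeq.not.mpr h05), if_neg h05]; omega
      · have hlt : (0:Int) < ((n.toNat / 10 : Nat) : Int) := by omega
        rw [dif_neg hz, if_pos hlt]
        by_cases h05 : n.toNat % 10 = 0 ∨ n.toNat % 10 = 5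
        · rw [if_pos (hbeq.mpr h05), if_pos h05]; push_cast; ring
        · rw [if_neg (hbeq.not.mpr h05), if_neg h05]; push_cast; ring
    · simp [h]

lemma pvDigitChar_p05 (r : Nat) (hr : r < 10) :
    ((Nat.digitChar r == '0' || Nat.digitChar r == '5') = true) ↔ (r = 0 ∨ r = 5) := by
  interval_cases r <;> simp [Nat.digitChar]

lemma pvToDigitsCore_count (f : Nat) : ∀ (m : Nat) (acc : List Char), m < f →
    (Nat.toDigitsCore 10 f m acc).countP (fun c => c == '0' || c == '5')
      = pvCnt m + acc.countP (fun c => c == '0' || c == '5') := by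
  induction f with
  | zero => intro m acc h; omega
  | succ f ih =>
    intro m acc h
    rw [Nat.toDigitsCore]
    by_cases hz : m / 10 = 0
    · rw [pvCnt]
      simp only [hz, if_pos, dif_pos, List.countP_cons]
      by_cases h05 : m % 10 = 0 ∨ m % 10 = 5
      · simp [(pvDigitChar_p05 (m % 10) (by omega)).mpr h05, h05]
        omega
      · have := (pvDigitChar_p05 (m % 10) (by omega)).not.mpr h05
        simp [this, h05]
    · have hf : m / 10 < f := by
        have : m / 10 < m := Nat.div_lt_self (by omega) (by norm_num)
        omega
      simp only [hz, if_neg, not_false_iff]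
      rw [ih _ _ hf]
      conv_rhs => rw [pvCnt]
      simp only [hz, dif_neg, not_false_iff, List.countP_cons]
      by_cases h05 : m % 10 = 0 ∨ m % 10 = 5
      · simp [(pvDigitChar_p05 (m % 10) (by omega)).mpr h05, h05]
        omega
      · have := (pvDigitChar_p05 (m % 10) (by omega)).not.mpr h05
        simp [this, h05]

lemma pvToDigits_count (m : Nat) :
    (Nat.toDigits 10 m).countP (fun c => c == '0' || c == '5') = pvCnt m := by
  have := pvToDigitsCore_count (m + 1) m [] (by omega)
  simpa [Nat.toDigits] using this

-- ===== VERDICT (by name: the statement is the Claim_ definition above) =====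
theorem nulla_es_ot_szamjegy_szam_spec : Claim_equal_nulla_es_ot_szamjegy_szam := by
  intro n _
  unfold Spec_nulla_es_ot_szamjegy_szam nulla_es_ot_szamjegy_szam nulla_es_ot_szamjegy_szam_alt
  rw [pvLoopA_eq n.toNat n 0 (le_refl _)]
  by_cases h : 0 < n
  · have hneg : ¬ n < 0 := by omega
    have hle : ¬ n ≤ 0 := by omega
    simp only [h, if_pos, hle, if_neg, not_false_iff, zero_add]
    rw [PySem.Int.toList_toStr, PySem.Int.toChars]
    simp only [hneg, if_neg, not_false_iff]
    rw [pvToDigits_count]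
  · have hle : n ≤ 0 := by omega
    simp [h, hle]
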